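-- pv_equiv track=rewrite | github.com/flyingspaghetti1/Task9 | mat_redis_cache_parallel.py | count_isolated_ones
-- ===== SOURCE A (Python) =====
-- def count_isolated_ones(matrix):
--     count = 0
--     rows, cols = len(matrix), len(matrix[0])
--
--     def is_isolated(i, j):
--         for x in range(max(0, i - 1), min(rows, i + 2)):
--             for y in range(max(0, j - 1), min(cols, j + 2)):
--                 if matrix[x][y] == '1' and (x != i or y != j):
--                     return False
--         return True
--
--     for i in range(rows):
--         for j in range(cols):
--             if matrix[i][j] == '1' and is_isolated(i, j):
--                 count += 1
--
--     return count
-- ===== SOURCE B (Python) =====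
-- def count_isolated_ones(matrix):
--     rows, cols = len(matrix), len(matrix[0])
--     marked = set()
--     for i in range(rows):
--         for j in range(cols):
--             if matrix[i][j] == '1':
--                 for x in range(max(0, i - 1), min(rows, i + 2)):
--                     for y in range(max(0, j - 1), min(cols, j + 2)):
--                         if (x, y) != (i, j):
--                             marked.add((x, y))
--     count = 0
--     for i in range(rows):
--         for j in range(cols):
--             if matrix[i][j] == '1' and (i, j) not in marked:
--                 count += 1
--     return count
-- ===== Notes on version B (the rewrite author's own statement) =====
-- stated objective: alternative
-- what changed: A decides each '1' cell by gathering: an inner is_isolated helper re-scans the cell's whole 3x3 window; B inverts the decomposition into a scatter pass in which every '1' adds its in-bounds neighbours to a marked set, followed by a pass counting '1' cells absent from that set.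
import Mathlib
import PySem

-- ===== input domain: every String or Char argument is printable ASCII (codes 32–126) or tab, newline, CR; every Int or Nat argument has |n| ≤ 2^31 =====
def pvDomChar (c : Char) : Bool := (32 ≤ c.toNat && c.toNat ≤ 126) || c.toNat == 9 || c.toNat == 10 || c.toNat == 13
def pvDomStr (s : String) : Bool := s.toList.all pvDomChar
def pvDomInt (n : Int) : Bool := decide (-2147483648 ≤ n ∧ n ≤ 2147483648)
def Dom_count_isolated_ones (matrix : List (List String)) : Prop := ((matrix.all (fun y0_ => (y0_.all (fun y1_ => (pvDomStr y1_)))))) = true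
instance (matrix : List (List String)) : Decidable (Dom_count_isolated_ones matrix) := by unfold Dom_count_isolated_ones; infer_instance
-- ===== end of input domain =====

-- B replaces A's per-'1' gather (re-scanning each cell's whole 3×3 window via is_isolated) with a
-- scatter pass: each '1' marks its in-bounds neighbours in a set, then unmarked '1's are counted
-- (objective: alternative decomposition, same asymptotic cost).

-- ===== PORT A =====

-- matrix[x][y]; exact on Pre_ (both indices are produced in range there)
def pvCell (matrix : List (List String)) (x y : Nat) : String :=
  (matrix.getD x []).getD y ""

-- range(max(0, k - 1), min(n, k + 2)) — Nat subtraction is exactly max(0, k-1)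
def pvWin (n k : Nat) : List Nat :=
  List.range' (k - 1) (min n (k + 2) - (k - 1))

-- the inner helper is_isolated(i, j): early return False = .all of the negation
def pvIsIsolated (matrix : List (List String)) (rows cols i j : Nat) : Bool :=
  (pvWin rows i).all (fun x =>
    (pvWin cols j).all (fun y =>
      !(pvCell matrix x y == "1" && !(x == i && y == j))))

def count_isolated_ones (matrix : List (List String)) : Int :=
  let rows := matrix.length
  let cols := (matrix.headD []).length  -- len(matrix[0]); exact on Pre_ (matrix nonempty)
  (List.range rows).foldl (fun count i =>
    (List.range cols).foldl (fun count j =>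
      if pvCell matrix i j == "1" && pvIsIsolated matrix rows cols i j then count + 1
      else count) count) 0

-- ===== PORT B =====

def count_isolated_ones_alt (matrix : List (List String)) : Int :=
  let rows := matrix.length
  let cols := (matrix.headD []).length  -- len(matrix[0]); exact on Pre_ (matrix nonempty)
  -- first pass: every '1' scatters a mark onto each in-bounds neighbour (itself excluded)
  let marked : PySem.Set (Nat × Nat) :=
    (List.range rows).foldl (fun s i =>
      (List.range cols).foldl (fun s j =>
        if pvCell matrix i j == "1" then
          (pvWin rows i).foldl (fun s x =>
            (pvWin cols j).foldl (fun s y =>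
              if !(x == i && y == j) then PySem.Set.add s (x, y) else s) s) s
        else s) s) PySem.Set.empty
  -- second pass: count '1' cells that received no mark
  (List.range rows).foldl (fun count i =>
    (List.range cols).foldl (fun count j =>
      if pvCell matrix i j == "1" && !(PySem.Set.contains marked (i, j)) then count + 1
      else count) count) 0

-- ===== PRECONDITION & SPEC =====
-- Pre_ excludes exactly the inputs on which Python A raises an IndexError: the empty matrix
-- (len(matrix[0])) and ragged matrices with a row shorter than the first row (matrix[x][y]).
def Pre_count_isolated_ones (matrix : List (List String)) : Prop :=
  matrix ≠ [] ∧ ∀ row ∈ matrix, (matrix.headD []).length ≤ row.length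
instance (matrix : List (List String)) : Decidable (Pre_count_isolated_ones matrix) := by
  unfold Pre_count_isolated_ones; infer_instance

def pvWitness_count_isolated_ones : List (List String) :=
  [["1", "0", "1"], ["0", "0", "0"], ["1", "1", "0"]]

def Spec_count_isolated_ones (matrix : List (List String)) (out : Int) : Prop := out = count_isolated_ones_alt matrix
instance (matrix : List (List String)) (out : Int) : Decidable (Spec_count_isolated_ones matrix out) := by unfold Spec_count_isolated_ones; infer_instance

-- ===== CLAIM (what is proved, stated in full; the proofs are below) =====
def Claim_equal_count_isolated_ones : Prop := ∀ (matrix : List (List String)), Dom_count_isolated_ones matrix → Pre_count_isolated_ones matrix → Spec_count_isolated_ones matrix (count_isolated_ones matrix)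

-- ===== LEMMAS AND PROOFS =====

-- window membership, arithmetically
lemma mem_pvWin {n k x : Nat} : x ∈ pvWin n k ↔ k - 1 ≤ x ∧ x < min n (k + 2) := by
  unfold pvWin
  rw [List.mem_range'_1]
  omega

-- generic fold-of-marking lemma: membership after a fold whose step adds exactly P b
lemma mem_foldl_or {α : Type} [BEq α] {β : Type} (step : PySem.Set α → β → PySem.Set α)
    (P : β → α → Prop) (hstep : ∀ s b p, p ∈ step s b ↔ p ∈ s ∨ P b p)
    (l : List β) (s : PySem.Set α) (p : α) :
    p ∈ l.foldl step s ↔ p ∈ s ∨ ∃ b ∈ l, P b p := by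
  induction l generalizing s with
  | nil => simp
  | cons b l ih =>
    rw [List.foldl_cons, ih, hstep]
    constructor
    · rintro ((h | h) | ⟨b', hb', hP⟩)
      exacts [Or.inl h, Or.inr ⟨b, List.mem_cons_self .., h⟩,
        Or.inr ⟨b', List.mem_cons_of_mem _ hb', hP⟩]
    · rintro (h | ⟨b', hb', hP⟩)
      · exact Or.inl (Or.inl h)
      · rcases List.mem_cons.1 hb' with rfl | hb''
        · exact Or.inl (Or.inr hP)
        · exact Or.inr ⟨b', hb'', hP⟩

lemma mem_foldl_addY (ys : List Nat) (s : PySem.Set (Nat × Nat)) (x i j : Nat) (p : Nat × Nat) :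
    p ∈ ys.foldl (fun s y => if !(x == i && y == j) then PySem.Set.add s (x, y) else s) s ↔
      p ∈ s ∨ ∃ y ∈ ys, p = (x, y) ∧ ¬(x = i ∧ y = j) := by
  refine mem_foldl_or _ (fun y p => p = (x, y) ∧ ¬(x = i ∧ y = j)) (fun s y p => ?_) ys s p
  by_cases h : x = i ∧ y = j
  · obtain ⟨rfl, rfl⟩ := h
    simp
  · have hb : (x == i && y == j) = false := by
      rw [Bool.and_eq_false_iff]
      rcases Decidable.not_and_iff_or_not.1 h with h' | h' <;> simp [h']
    simp [hb, PySem.Set.mem_add, h]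

lemma mem_foldl_addXY (xs ys : List Nat) (s : PySem.Set (Nat × Nat)) (i j : Nat) (p : Nat × Nat) :
    p ∈ xs.foldl (fun s x => ys.foldl
        (fun s y => if !(x == i && y == j) then PySem.Set.add s (x, y) else s) s) s ↔
      p ∈ s ∨ ∃ x ∈ xs, ∃ y ∈ ys, p = (x, y) ∧ ¬(x = i ∧ y = j) := by
  exact mem_foldl_or _ (fun x p => ∃ y ∈ ys, p = (x, y) ∧ ¬(x = i ∧ y = j))
    (fun s x p => mem_foldl_addY ys s x i j p) xs s p

-- the scatter step of one source cell (i, j)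
def pvScatter (matrix : List (List String)) (rows cols : Nat) (s : PySem.Set (Nat × Nat)) (i j : Nat) :
    PySem.Set (Nat × Nat) :=
  if pvCell matrix i j == "1" then
    (pvWin rows i).foldl (fun s x =>
      (pvWin cols j).foldl (fun s y =>
        if !(x == i && y == j) then PySem.Set.add s (x, y) else s) s) s
  else s

-- "source (i, j) scatters a mark onto p"
def pvContrib (matrix : List (List String)) (rows cols i j : Nat) (p : Nat × Nat) : Prop :=
  pvCell matrix i j = "1" ∧ ∃ x ∈ pvWin rows i, ∃ y ∈ pvWin cols j, p = (x, y) ∧ ¬(x = i ∧ y = j)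

lemma mem_pvScatter (matrix : List (List String)) (rows cols : Nat) (s : PySem.Set (Nat × Nat))
    (i j : Nat) (p : Nat × Nat) :
    p ∈ pvScatter matrix rows cols s i j ↔ p ∈ s ∨ pvContrib matrix rows cols i j p := by
  unfold pvScatter pvContrib
  split
  · rw [mem_foldl_addXY]
    simp_all
  · simp_all

lemma mem_foldl_scatterIJ (is js : List Nat) (matrix : List (List String)) (rows cols : Nat)
    (s : PySem.Set (Nat × Nat)) (p : Nat × Nat) :
    p ∈ is.foldl (fun s i => js.foldl (fun s j => pvScatter matrix rows cols s i j) s) s ↔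
      p ∈ s ∨ ∃ i ∈ is, ∃ j ∈ js, pvContrib matrix rows cols i j p := by
  exact mem_foldl_or _ (fun i p => ∃ j ∈ js, pvContrib matrix rows cols i j p)
    (fun s i p => mem_foldl_or _ (fun j p => pvContrib matrix rows cols i j p)
      (fun s j p => mem_pvScatter matrix rows cols s i j p) js s p) is s p

-- A's helper, characterised
lemma pvIsIsolated_iff (matrix : List (List String)) (rows cols i j : Nat) :
    pvIsIsolated matrix rows cols i j = true ↔
      ∀ x ∈ pvWin rows i, ∀ y ∈ pvWin cols j, pvCell matrix x y = "1" → (x = i ∧ y = j) := by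
  unfold pvIsIsolated
  simp [List.all_eq_true]
  constructor <;> intro h x hx y hy <;> have := h x hx y hy <;> tauto

-- gather = scatter: an in-range cell is isolated exactly when no source marks it
lemma isolated_iff_not_marked (matrix : List (List String)) (rows cols i j : Nat)
    (hi : i < rows) (hj : j < cols) :
    pvIsIsolated matrix rows cols i j = true ↔
      ¬ ∃ a ∈ List.range rows, ∃ b ∈ List.range cols, pvContrib matrix rows cols a b (i, j) := by
  rw [pvIsIsolated_iff]
  constructor
  · rintro h ⟨a, ha, b, hb, h1, x, hx, y, hy, hp, hne⟩
    rw [List.mem_range] at ha hb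
    rw [mem_pvWin] at hx hy
    rw [Prod.mk.injEq] at hp
    obtain ⟨rfl, rfl⟩ := hp
    have hab := h a (mem_pvWin.2 (by omega)) b (mem_pvWin.2 (by omega)) h1
    exact hne ⟨hab.1.symm, hab.2.symm⟩
  · intro h x hx y hy h1
    by_contra hne
    rw [mem_pvWin] at hx hy
    exact h ⟨x, List.mem_range.2 (by omega), y, List.mem_range.2 (by omega), h1,
      i, mem_pvWin.2 (by omega), j, mem_pvWin.2 (by omega), rfl, fun hij => hne ⟨hij.1.symm, hij.2.symm⟩⟩

-- congruence for a counting fold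
lemma foldl1_count_congr (js : List Nat) (f g : Nat → Bool) (h : ∀ j ∈ js, f j = g j) (c : Int) :
    js.foldl (fun c j => if f j then c + 1 else c) c =
    js.foldl (fun c j => if g j then c + 1 else c) c := by
  induction js generalizing c with
  | nil => rfl
  | cons j js ih =>
    rw [List.foldl_cons, List.foldl_cons, h j (List.mem_cons_self ..)]
    exact ih (fun j' hj' => h j' (List.mem_cons_of_mem _ hj')) _

-- congruence for the two nested counting folds
lemma foldl2_count_congr (is js : List Nat) (f g : Nat → Nat → Bool)
    (h : ∀ i ∈ is, ∀ j ∈ js, f i j = g i j) (c : Int) :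
    is.foldl (fun c i => js.foldl (fun c j => if f i j then c + 1 else c) c) c =
    is.foldl (fun c i => js.foldl (fun c j => if g i j then c + 1 else c) c) c := by
  induction is generalizing c with
  | nil => rfl
  | cons i is ih =>
    rw [List.foldl_cons, List.foldl_cons,
      foldl1_count_congr js (f i) (g i) (h i (List.mem_cons_self ..)) c]
    exact ih (fun i' hi' => h i' (List.mem_cons_of_mem _ hi')) _

-- ===== VERDICT (by name: the statement is the Claim_ definition above) =====
theorem count_isolated_ones_spec : Claim_equal_count_isolated_ones := by
  intro matrix _ _
  unfold Spec_count_isolated_ones count_isolated_ones count_isolated_ones_alt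
  show (List.range matrix.length).foldl (fun count i =>
      (List.range (matrix.headD []).length).foldl (fun count j =>
        if pvCell matrix i j == "1" &&
            pvIsIsolated matrix matrix.length (matrix.headD []).length i j
        then count + 1 else count) count) 0 =
    (List.range matrix.length).foldl (fun count i =>
      (List.range (matrix.headD []).length).foldl (fun count j =>
        if pvCell matrix i j == "1" &&
            !(PySem.Set.contains
              ((List.range matrix.length).foldl (fun s a =>
                (List.range (matrix.headD []).length).foldl (fun s b =>
                  pvScatter matrix matrix.length (matrix.headD []).length s a b) s)
                PySem.Set.empty) (i, j))
        then count + 1 else count) count) 0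
  generalize hC : (matrix.headD []).length = C
  generalize hR : matrix.length = R
  apply foldl2_count_congr
  intro i hi j hj
  rw [List.mem_range] at hi hj
  cases hc : pvCell matrix i j == "1"
  · simp
  · simp only [Bool.true_and]
    have hmem : ((i, j) ∈ (List.range R).foldl (fun s a => (List.range C).foldl (fun s b =>
        pvScatter matrix R C s a b) s) PySem.Set.empty) ↔
        ∃ a ∈ List.range R, ∃ b ∈ List.range C, pvContrib matrix R C a b (i, j) := by
      rw [mem_foldl_scatterIJ]
      simp [PySem.Set.empty]
    have hiso := isolated_iff_not_marked matrix R C i j hi hj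
    cases hI : pvIsIsolated matrix R C i j
    · have hex : ∃ a ∈ List.range R, ∃ b ∈ List.range C, pvContrib matrix R C a b (i, j) := by
        by_contra hne
        rw [← hiso] at hne
        simp [hI] at hne
      have hin : (i, j) ∈ (List.range R).foldl (fun s a => (List.range C).foldl (fun s b =>
          pvScatter matrix R C s a b) s) PySem.Set.empty := hmem.2 hex
      have hct : PySem.Set.contains ((List.range R).foldl (fun s a => (List.range C).foldl
          (fun s b => pvScatter matrix R C s a b) s) PySem.Set.empty) (i, j) = true := by
        simpa [PySem.Set.contains] using hin
      rw [hct]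
      rfl
    · have hnin : (i, j) ∉ (List.range R).foldl (fun s a => (List.range C).foldl (fun s b =>
          pvScatter matrix R C s a b) s) PySem.Set.empty :=
        fun hmem' => (hiso.1 hI) (hmem.1 hmem')
      have hct : PySem.Set.contains ((List.range R).foldl (fun s a => (List.range C).foldl
          (fun s b => pvScatter matrix R C s a b) s) PySem.Set.empty) (i, j) = false := by
        simpa [PySem.Set.contains] using hnin
      rw [hct]
      rfl
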